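-- pv_equiv track=rewrite | github.com/XiaoFaJiang/llm_code_robustness | perturbation_pipeline/pipeline.py | __get_indent_level
-- ===== SOURCE A (Python) =====
-- def __get_indent_level(code):
--     '''
--     获取某行的缩进级别
--     '''
--     ret = ""
--     for i,v in enumerate(code):
--         if v == ' ':
--             ret += v
--         elif v == '\t':
--             ret += v
--         else:
--             break
--     return ret
-- ===== SOURCE B (Python) =====
-- import re
--
-- def __get_indent_level(code):
--     return re.match(r'[ \t]*', code).group()
-- ===== Notes on version B (the rewrite author's own statement) =====
-- stated objective: idiomatic
-- what changed: Replaces the explicit enumerate/accumulate/break loop with a single closed-form regex match re.match(r'[ \t]*', code).group().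
import Mathlib
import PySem

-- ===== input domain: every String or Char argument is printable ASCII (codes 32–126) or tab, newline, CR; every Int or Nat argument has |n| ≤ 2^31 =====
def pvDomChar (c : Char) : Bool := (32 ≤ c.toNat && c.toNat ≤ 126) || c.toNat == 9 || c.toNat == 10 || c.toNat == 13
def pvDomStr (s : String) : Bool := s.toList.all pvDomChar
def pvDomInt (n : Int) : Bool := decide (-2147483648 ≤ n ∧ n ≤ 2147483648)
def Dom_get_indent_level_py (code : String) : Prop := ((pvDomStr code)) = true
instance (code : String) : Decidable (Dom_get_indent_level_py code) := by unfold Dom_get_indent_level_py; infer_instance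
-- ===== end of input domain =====

-- B replaces A's explicit accumulate-and-break loop with a closed-form regex match of the leading [ \\t]* run (ported as takeWhile); return values agree on all strings.
-- ===== PORT A =====
-- loop body of A: walk the characters, appending ' '/'\t' to ret, stopping (break) at the first other char
def pvALoop_get_indent_level_py : List Char → String → String
  | [], ret => ret
  | v :: rest, ret =>
      if v = ' ' then pvALoop_get_indent_level_py rest (ret.push v)
      else if v = '\t' then pvALoop_get_indent_level_py rest (ret.push v)
      else ret

def get_indent_level_py (code : String) : String :=
  pvALoop_get_indent_level_py code.toList ""

-- ===== PORT B =====
-- re.match(r'[ \\t]*', code).group(): the maximal leading run of spaces/tabs, i.e. takeWhile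
def get_indent_level_py_alt (code : String) : String :=
  String.ofList (code.toList.takeWhile (fun c => c = ' ' || c = '\t'))

-- ===== PRECONDITION & SPEC =====
def Spec_get_indent_level_py (code : String) (out : String) : Prop := out = get_indent_level_py_alt code
instance (code : String) (out : String) : Decidable (Spec_get_indent_level_py code out) := by unfold Spec_get_indent_level_py; infer_instance

-- ===== CLAIM (what is proved, stated in full; the proofs are below) =====
def Claim_equal_get_indent_level_py : Prop := ∀ (code : String), Dom_get_indent_level_py code → Spec_get_indent_level_py code (get_indent_level_py code)

-- ===== LEMMAS AND PROOFS =====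

theorem pvALoop_eq (cs : List Char) (ret : String) :
    pvALoop_get_indent_level_py cs ret
      = ret ++ String.ofList (cs.takeWhile (fun c => c = ' ' || c = '\t')) := by
  induction cs generalizing ret with
  | nil => simp [pvALoop_get_indent_level_py]
  | cons v rest ih =>
    by_cases hs : v = ' '
    · simp [pvALoop_get_indent_level_py, hs, List.takeWhile, ih]
      apply String.toList_inj.mp
      simp [String.toList_push]
    · by_cases ht : v = '\t'
      · simp [pvALoop_get_indent_level_py, ht, List.takeWhile, ih]
        apply String.toList_inj.mp
        simp [String.toList_push]
      · simp [pvALoop_get_indent_level_py, hs, ht, List.takeWhile]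

-- ===== VERDICT (by name: the statement is the Claim_ definition above) =====
theorem get_indent_level_py_spec : Claim_equal_get_indent_level_py := by
  intro code _
  show get_indent_level_py code = get_indent_level_py_alt code
  rw [get_indent_level_py, get_indent_level_py_alt, pvALoop_eq]
  apply String.toList_inj.mp
  simp
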